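-- pv_equiv track=rewrite | github.com/philipmories/LoRTIA-Plus | benchmark/KSHV/scripts/merge_transcripts.py | internal_signature
-- ===== SOURCE A (Python) =====
-- from typing import Any, Dict, Iterable, List, Optional, Tuple
--
-- def internal_signature(exons: List[Tuple[int, int]]) -> Tuple[int, ...]:
--     """
--     Build a signature for multi-exon transcripts that ignores only:
--     - the first exon start
--     - the last exon end
--
--     This allows fuzzy merging where only transcript ends can move.
--     """
--     if len(exons) <= 1:
--         return tuple()
--
--     signature: List[int] = []
--     signature.append(exons[0][1])  # end of first exon
--
--     for start, end in exons[1:-1]: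
--         signature.extend([start, end])
--
--     signature.append(exons[-1][0])  # start of last exon
--     return tuple(signature)
-- ===== SOURCE B (Python) =====
-- def internal_signature(exons):
--     flat = [c for exon in exons for c in exon]
--     return tuple(flat[1:-1])
-- ===== Notes on version B (the rewrite author's own statement) =====
-- stated objective: simpler
-- what changed: Instead of guarding len<=1 and handling first exon, middle slice and last exon separately, B flattens all coordinates into one list and slices off the first and last element, which yields the same signature uniformly.
import Mathlib
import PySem

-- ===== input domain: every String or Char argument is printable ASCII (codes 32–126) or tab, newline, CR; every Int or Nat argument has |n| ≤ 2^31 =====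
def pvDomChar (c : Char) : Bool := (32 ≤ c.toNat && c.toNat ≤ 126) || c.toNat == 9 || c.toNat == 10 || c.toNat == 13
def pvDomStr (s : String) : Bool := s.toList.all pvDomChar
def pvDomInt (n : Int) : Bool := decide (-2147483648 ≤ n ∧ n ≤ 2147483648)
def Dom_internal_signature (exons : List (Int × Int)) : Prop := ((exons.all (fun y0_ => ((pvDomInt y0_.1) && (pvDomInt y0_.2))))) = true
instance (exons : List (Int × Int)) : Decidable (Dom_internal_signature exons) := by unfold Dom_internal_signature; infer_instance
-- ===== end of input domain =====

-- ===== PORT A =====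
-- B flattens all exon coordinates and slices off the first and last; simpler uniform decomposition.
def internal_signature (exons : List (Int × Int)) : List Int :=
  if exons.length ≤ 1 then []
  else
    let signature : List Int := [((PySem.List.pyGet? exons 0).getD (0, 0)).2]
    let signature := (PySem.List.slice exons (some 1) (some (-1))).foldl
      (fun acc (p : Int × Int) => acc ++ [p.1, p.2]) signature
    signature ++ [((PySem.List.pyGet? exons (-1)).getD (0, 0)).1]

-- ===== PORT B =====
def internal_signature_alt (exons : List (Int × Int)) : List Int :=
  let flat := exons.flatMap (fun exon => [exon.1, exon.2])
  PySem.List.slice flat (some 1) (some (-1))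

-- ===== PRECONDITION & SPEC =====
def Spec_internal_signature (exons : List (Int × Int)) (out : List Int) : Prop := out = internal_signature_alt exons
instance (exons : List (Int × Int)) (out : List Int) : Decidable (Spec_internal_signature exons out) := by unfold Spec_internal_signature; infer_instance

-- ===== CLAIM (what is proved, stated in full; the proofs are below) =====
def Claim_equal_internal_signature : Prop := ∀ (exons : List (Int × Int)), Dom_internal_signature exons → Spec_internal_signature exons (internal_signature exons)

-- ===== LEMMAS AND PROOFS =====

-- xs[1:-1] is tail-then-dropLast
theorem pv_slice_one_neg_one {α : Type} (xs : List α) :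
    PySem.List.slice xs (some 1) (some (-1)) = xs.tail.dropLast := by
  simp [PySem.List.slice]
  cases xs with
  | nil => simp
  | cons x xs => simp [List.dropLast_eq_take]

-- xs[-1] is the last element
theorem pv_pyGet?_neg_one {α : Type} (xs : List α) :
    PySem.List.pyGet? xs (-1) = xs.getLast? := by
  simp [PySem.List.pyGet?, PySem.List.pyIdx?]
  rcases xs with _ | ⟨x, xs⟩
  · simp
  · simp [List.getLast?_eq_getElem?]

-- dropping the last flattened coordinate of a nonempty exon list keeps the last start
theorem pv_flatdrop : ∀ (ys : List (Int × Int)) (e : Int × Int),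
    ((e :: ys).flatMap (fun p => [p.1, p.2])).dropLast
      = (e :: ys).dropLast.flatMap (fun p => [p.1, p.2])
        ++ [((e :: ys).getLastD (0, 0)).1] := by
  intro ys
  induction ys with
  | nil => intro e; simp
  | cons y ys ih =>
    intro e
    have step : ((e :: y :: ys).flatMap (fun p => [p.1, p.2])).dropLast
        = [e.1, e.2] ++ ((y :: ys).flatMap (fun p => [p.1, p.2])).dropLast := by
      simp only [List.flatMap_cons]
      rw [List.dropLast_append_of_ne_nil (by simp)]
    rw [step, ih y]
    simp [List.getLastD]

theorem pv_sig_eq (exons : List (Int × Int)) :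
    internal_signature exons = internal_signature_alt exons := by
  cases exons with
  | nil => rfl
  | cons e0 rest =>
    cases rest with
    | nil =>
      simp [internal_signature, internal_signature_alt, pv_slice_one_neg_one]
    | cons e1 rest =>
      have hne : (e1 :: rest).flatMap (fun p : Int × Int => [p.1, p.2]) ≠ [] := by
        cases rest <;> simp
      simp only [internal_signature, internal_signature_alt,
        pv_slice_one_neg_one, pv_pyGet?_neg_one,
        PySem.List.foldl_append_eq_flatMap (fun p : Int × Int => [p.1, p.2])]
      rw [if_neg (by simp)]
      rw [show (List.flatMap (fun p : Int × Int => [p.1, p.2]) (e0 :: e1 :: rest)).tail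
            = e0.2 :: List.flatMap (fun p : Int × Int => [p.1, p.2]) (e1 :: rest) from by simp,
          List.dropLast_cons_of_ne_nil hne, pv_flatdrop]
      simp [PySem.List.pyGet?, PySem.List.pyIdx?, List.getLastD_eq_getLast?,
        List.getLast?_cons_cons]
      rw [if_pos (by positivity)]
      rfl

-- ===== VERDICT (by name: the statement is the Claim_ definition above) =====
theorem internal_signature_spec : Claim_equal_internal_signature := by
  intro exons _
  exact pv_sig_eq exons
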